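-- pv_equiv track=rewrite | github.com/OxWearables/asleep | src/asleep/sleep_windows.py | fill_sleep_block_gaps
-- ===== SOURCE A (Python) =====
-- IS_SLEEP_FLAG = 1
--
-- CLASS_POS = 0
--
-- LEN_POS = 1
--
-- IDX_POS = 2
--
-- def fill_sleep_block_gaps(sleep_block_idxes, counter):
--     # fill all the eligible sleep blocks gaps with sleep class
--     gap2fill = count_sleep_block_gap(sleep_block_idxes, counter)
--
--     for gap in gap2fill:
--         current_sleep_block_counter_id = sleep_block_idxes[gap]
--         next_sleep_block_counter_id = sleep_block_idxes[gap + 1]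
--
--         k = current_sleep_block_counter_id + 1
--         while k <= next_sleep_block_counter_id:
--             counter[k][CLASS_POS] = IS_SLEEP_FLAG
--             k += 1
--
--     return counter
--
-- def count_sleep_block_gap(sleep_block_idxes, counter, epoch_length=30):
--     # epoch_length sec
--     gap2fill = []
--     if len(sleep_block_idxes) > 1:
--         first_block = counter[sleep_block_idxes[0]]
--         end_of_block_idx = first_block[IDX_POS] + first_block[LEN_POS]
--         min_one_hour_block_diff = 60 * 60 / epoch_length
--         i = 1
--         while i < len(sleep_block_idxes):
--             current_block = counter[sleep_block_idxes[i]]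
--             dist2pre_block = current_block[IDX_POS] - end_of_block_idx
--             if dist2pre_block <= min_one_hour_block_diff:
--                 gap2fill.append(i - 1)
--             end_of_block_idx = current_block[IDX_POS] + current_block[LEN_POS]
--             i += 1
--     return gap2fill
-- ===== SOURCE B (Python) =====
-- IS_SLEEP_FLAG = 1
-- CLASS_POS = 0
-- LEN_POS = 1
-- IDX_POS = 2
--
--
-- def fill_sleep_block_gaps(sleep_block_idxes, counter):
--     # Single pass over the blocks: fill each short gap as soon as it is seen,
--     # without building the intermediate gap-index list.
--     # Mutates counter in place, like the original.
--     if len(sleep_block_idxes) > 1: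
--         prev = sleep_block_idxes[0]
--         first = counter[prev]
--         end_of_block = first[IDX_POS] + first[LEN_POS]
--         for cur in sleep_block_idxes[1:]:
--             blk = counter[cur]
--             if blk[IDX_POS] - end_of_block <= 60 * 60 / 30:
--                 for k in range(prev + 1, cur + 1):
--                     counter[k][CLASS_POS] = IS_SLEEP_FLAG
--             end_of_block = blk[IDX_POS] + blk[LEN_POS]
--             prev = cur
--     return counter
-- ===== Notes on version B (the rewrite author's own statement) =====
-- stated objective: simpler
-- what changed: B makes one pass over the blocks, filling each short gap the moment it is detected, instead of A's two phases (first build the gap2fill index list via count_sleep_block_gap, then re-index sleep_block_idxes to replay the fills); the intermediate gap list and the position-index indirection disappear.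
import Mathlib
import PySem

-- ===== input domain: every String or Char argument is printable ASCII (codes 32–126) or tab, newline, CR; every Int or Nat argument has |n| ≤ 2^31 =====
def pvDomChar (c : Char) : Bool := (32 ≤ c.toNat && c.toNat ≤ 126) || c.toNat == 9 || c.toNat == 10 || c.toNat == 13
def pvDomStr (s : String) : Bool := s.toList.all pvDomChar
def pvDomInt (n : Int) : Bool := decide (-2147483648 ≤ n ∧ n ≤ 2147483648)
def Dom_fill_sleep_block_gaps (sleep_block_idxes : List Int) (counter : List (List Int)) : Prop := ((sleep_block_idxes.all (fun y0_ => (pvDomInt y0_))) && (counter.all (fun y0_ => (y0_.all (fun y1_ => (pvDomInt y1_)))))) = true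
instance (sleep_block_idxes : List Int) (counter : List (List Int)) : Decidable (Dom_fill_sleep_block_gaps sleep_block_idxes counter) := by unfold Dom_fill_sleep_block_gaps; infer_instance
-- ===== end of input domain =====

-- B replaces A's two phases (build the gap2fill position list, then re-index sleep_block_idxes
-- to replay the fills) by a single pass that fills each short gap as soon as it is seen
-- (objective: simpler).  Both Pythons mutate `counter` in place the same way; the equivalence
-- proved here is about the returned value.

-- Shared Python-indexing idioms appearing literally in both sources:
-- `counter[i]` (pvRow), `row[j]` (pvFld), `counter[k][CLASS_POS] = IS_SLEEP_FLAG` (pvSetSleep).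
def pvRow (counter : List (List Int)) (i : Int) : List Int :=
  (PySem.List.pyGet? counter i).getD []

def pvFld (r : List Int) (j : Int) : Int :=
  (PySem.List.pyGet? r j).getD 0

-- `counter[k][0] = 1` (Python index normalisation; no-op outside range, excluded by Pre_)
def pvSetSleep (c : List (List Int)) (k : Int) : List (List Int) :=
  let n : Int := if k < 0 then k + c.length else k
  if 0 ≤ n ∧ n < (c.length : Int) then c.modify n.toNat (fun r => r.set 0 1) else c

-- ===== PORT A =====
-- the `while i < len(...)` loop of count_sleep_block_gap, walking the remaining idxes
-- (`dist2pre_block <= 60*60/30` : the float bound 120.0 compared with an int is exactly `≤ 120`)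
def pvGapAux (counter : List (List Int)) (rest : List Int) (i : Int) (endIdx : Int) : List Int :=
  match rest with
  | [] => []
  | b :: tl =>
      let cur := pvRow counter b
      let dist := pvFld cur 2 - endIdx
      let rec' := pvGapAux counter tl (i + 1) (pvFld cur 2 + pvFld cur 1)
      if dist ≤ 120 then (i - 1) :: rec' else rec'

def count_sleep_block_gap (sleep_block_idxes : List Int) (counter : List (List Int)) : List Int :=
  if 1 < sleep_block_idxes.length then
    let first := pvRow counter ((PySem.List.pyGet? sleep_block_idxes 0).getD 0)
    pvGapAux counter (sleep_block_idxes.drop 1) 1 (pvFld first 2 + pvFld first 1)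
  else []

-- the `while k <= next_sleep_block_counter_id` fill loop
def pvFillWhile (c : List (List Int)) (k next : Int) : List (List Int) :=
  if k ≤ next then pvFillWhile (pvSetSleep c k) (k + 1) next else c
termination_by (next + 1 - k).toNat
decreasing_by omega

def fill_sleep_block_gaps (sleep_block_idxes : List Int) (counter : List (List Int)) : List (List Int) :=
  (count_sleep_block_gap sleep_block_idxes counter).foldl
    (fun c gap =>
      let cur := (PySem.List.pyGet? sleep_block_idxes gap).getD 0
      let nxt := (PySem.List.pyGet? sleep_block_idxes (gap + 1)).getD 0
      pvFillWhile c (cur + 1) nxt) counter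

-- ===== PORT B =====
-- `for k in range(prev + 1, cur + 1): counter[k][CLASS_POS] = IS_SLEEP_FLAG`
def pvFillRange (c : List (List Int)) (lo hi : Int) : List (List Int) :=
  (PySem.List.pyRange lo hi 1).foldl pvSetSleep c

-- `for cur in sleep_block_idxes[1:]: ...` threading (prev, end_of_block) and mutating counter
def pvBLoop (c : List (List Int)) (rest : List Int) (prev endB : Int) : List (List Int) :=
  match rest with
  | [] => c
  | cur :: tl =>
      let blk := pvRow c cur
      let c' := if pvFld blk 2 - endB ≤ 120 then pvFillRange c (prev + 1) (cur + 1) else c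
      pvBLoop c' tl cur (pvFld blk 2 + pvFld blk 1)

def fill_sleep_block_gaps_alt (sleep_block_idxes : List Int) (counter : List (List Int)) : List (List Int) :=
  match sleep_block_idxes with
  | p0 :: cur :: tl =>
      let first := pvRow counter p0
      pvBLoop counter (cur :: tl) p0 (pvFld first 2 + pvFld first 1)
  | _ => counter

-- ===== PRECONDITION & SPEC =====
-- Pre_ = where Python A returns without an exception, with two stated (cited) narrowings:
-- it also excludes negative-but-in-range block indexes (Python wraparound) and inputs whose
-- untouched rows are empty — on those A still returns (and B agrees; see the cites).
def Pre_fill_sleep_block_gaps (sleep_block_idxes : List Int) (counter : List (List Int)) : Prop :=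
  sleep_block_idxes.length ≤ 1 ∨
  ((∀ e ∈ sleep_block_idxes,
      0 ≤ e ∧ e < (counter.length : Int) ∧ 3 ≤ (counter.getD e.toNat []).length) ∧
   ∀ r ∈ counter, r ≠ [])
instance (sleep_block_idxes : List Int) (counter : List (List Int)) : Decidable (Pre_fill_sleep_block_gaps sleep_block_idxes counter) := by unfold Pre_fill_sleep_block_gaps; infer_instance

def pvWitness_fill_sleep_block_gaps : List Int × List (List Int) :=
  ([0, 1], [[5, 2, 0], [1, 3, 10]])

def Spec_fill_sleep_block_gaps (sleep_block_idxes : List Int) (counter : List (List Int)) (out : List (List Int)) : Prop := out = fill_sleep_block_gaps_alt sleep_block_idxes counter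
instance (sleep_block_idxes : List Int) (counter : List (List Int)) (out : List (List Int)) : Decidable (Spec_fill_sleep_block_gaps sleep_block_idxes counter out) := by unfold Spec_fill_sleep_block_gaps; infer_instance

-- ===== CLAIM (what is proved, stated in full; the proofs are below) =====
def Claim_equal_fill_sleep_block_gaps : Prop := ∀ (sleep_block_idxes : List Int) (counter : List (List Int)), Dom_fill_sleep_block_gaps sleep_block_idxes counter → Pre_fill_sleep_block_gaps sleep_block_idxes counter → Spec_fill_sleep_block_gaps sleep_block_idxes counter (fill_sleep_block_gaps sleep_block_idxes counter)

-- ===== LEMMAS AND PROOFS =====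

-- the (prev, cur) gap pairs both programs fill, read off the (original) counter
def pvPairs (counter : List (List Int)) (rest : List Int) (prev endB : Int) : List (Int × Int) :=
  match rest with
  | [] => []
  | cur :: tl =>
      let blk := pvRow counter cur
      let rec' := pvPairs counter tl cur (pvFld blk 2 + pvFld blk 1)
      if pvFld blk 2 - endB ≤ 120 then (prev, cur) :: rec' else rec'

-- writing the class field (index 0) never changes fields 1, 2 of any row
theorem pvFld_set0 (r : List Int) (j : Int) (hj : 1 ≤ j) :
    pvFld (r.set 0 1) j = pvFld r j := by
  have h0 : (0:Int) ≤ j := by omega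
  unfold pvFld
  rw [PySem.List.pyGet?_of_nonneg _ h0, PySem.List.pyGet?_of_nonneg _ h0,
    List.getElem?_set_ne (by omega)]

theorem pvFld_row_modify (c : List (List Int)) (m : Nat) (b j : Int) (hj : 1 ≤ j) :
    pvFld (pvRow (c.modify m (fun r => r.set 0 1)) b) j = pvFld (pvRow c b) j := by
  unfold pvRow
  simp only [PySem.List.pyGet?, List.length_modify]
  cases h : PySem.List.pyIdx? c.length b with
  | none => simp
  | some k =>
      simp only [Option.bind_some, List.getElem?_modify]
      cases hg : (getElem? c k : Option (List Int)) with
      | none => simp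
      | some r =>
          by_cases hm : m = k
          · simp [hm, pvFld_set0 r j hj]
          · simp [hm]

theorem pvFld_setSleep (c : List (List Int)) (k b j : Int) (hj : 1 ≤ j) :
    pvFld (pvRow (pvSetSleep c k) b) j = pvFld (pvRow c b) j := by
  unfold pvSetSleep
  by_cases h : 0 ≤ (if k < 0 then k + (c.length:Int) else k) ∧
      (if k < 0 then k + (c.length:Int) else k) < (c.length : Int)
  · simp only [h]
    exact pvFld_row_modify c _ b j hj
  · simp only [h, if_false]

theorem pvFld_foldl_setSleep (ks : List Int) :
    ∀ (c : List (List Int)) (b j : Int), 1 ≤ j →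
      pvFld (pvRow (ks.foldl pvSetSleep c) b) j = pvFld (pvRow c b) j := by
  induction ks with
  | nil => intro c b j hj; rfl
  | cons k tl ih =>
      intro c b j hj
      simp only [List.foldl_cons]
      rw [ih (pvSetSleep c k) b j hj, pvFld_setSleep c k b j hj]

theorem pvFld_fillRange (c : List (List Int)) (lo hi b j : Int) (hj : 1 ≤ j) :
    pvFld (pvRow (pvFillRange c lo hi) b) j = pvFld (pvRow c b) j :=
  pvFld_foldl_setSleep _ c b j hj

-- A's while-fill is B's range-fill
theorem pvFillWhile_eq_range (c : List (List Int)) (k next : Int) :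
    pvFillWhile c k next = pvFillRange c k (next + 1) := by
  fun_induction pvFillWhile c k next with
  | case1 c k h ih =>
      rw [ih]
      unfold pvFillRange
      rw [show PySem.List.pyRange k (next + 1) = k :: PySem.List.pyRange (k + 1) (next + 1)
        from PySem.List.pyRange_one_cons (by omega)]
      rfl
  | case2 c k h =>
      unfold pvFillRange
      rw [PySem.List.pyRange_one_eq_nil (by omega)]
      rfl

-- A's fold over gap positions = fold over the gap pairs
theorem pvA_fold (idxes : List Int) (counter : List (List Int)) :
    ∀ (rest : List Int) (i prev endIdx : Int) (c : List (List Int)),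
      1 ≤ i →
      PySem.List.pyGet? idxes (i - 1) = some prev →
      idxes.drop i.toNat = rest →
      (pvGapAux counter rest i endIdx).foldl
        (fun c gap =>
          pvFillWhile c ((PySem.List.pyGet? idxes gap).getD 0 + 1)
            ((PySem.List.pyGet? idxes (gap + 1)).getD 0)) c
      = (pvPairs counter rest prev endIdx).foldl
          (fun c pr => pvFillRange c (pr.1 + 1) (pr.2 + 1)) c := by
  intro rest
  induction rest with
  | nil => intro i prev endIdx c _ _ _; rfl
  | cons cur tl ih =>
      intro i prev endIdx c hi hprev hdrop
      have hcur : PySem.List.pyGet? idxes i = some cur := by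
        rw [PySem.List.pyGet?_of_nonneg _ (by omega : (0:Int) ≤ i)]
        have h2 : (idxes.drop i.toNat)[0]? = some cur := by rw [hdrop]; rfl
        rw [List.getElem?_drop] at h2
        simp at h2
        exact h2
      have hdrop' : idxes.drop (i + 1).toNat = tl := by
        have h1 : (i + 1).toNat = i.toNat + 1 := by omega
        rw [h1, ← List.drop_drop, hdrop]; rfl
      have hprev' : PySem.List.pyGet? idxes ((i + 1) - 1) = some cur := by
        simpa using hcur
      simp only [pvGapAux, pvPairs]
      by_cases hgap : pvFld (pvRow counter cur) 2 - endIdx ≤ 120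
      · simp only [if_pos hgap, List.foldl_cons]
        rw [ih (i + 1) cur _ _ (by omega) hprev' hdrop']
        congr 1
        simp only [hprev]
        have : i - 1 + 1 = i := by omega
        rw [this, hcur]
        simp only [Option.getD_some]
        exact pvFillWhile_eq_range c (prev + 1) cur
      · simp only [if_neg hgap]
        exact ih (i + 1) cur _ c (by omega) hprev' hdrop'

-- B's interleaved pass = fold over the gap pairs read off the original counter
-- (writes touch only field 0; the pass reads only fields 1 and 2)
theorem pvB_fold :
    ∀ (rest : List Int) (prev endB : Int) (c₀ c : List (List Int)),
      (∀ b j, 1 ≤ j → pvFld (pvRow c b) j = pvFld (pvRow c₀ b) j) →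
      pvBLoop c rest prev endB
        = (pvPairs c₀ rest prev endB).foldl
            (fun c pr => pvFillRange c (pr.1 + 1) (pr.2 + 1)) c := by
  intro rest
  induction rest with
  | nil => intro prev endB c₀ c _; rfl
  | cons cur tl ih =>
      intro prev endB c₀ c hinv
      simp only [pvBLoop, pvPairs]
      rw [hinv cur 2 (by omega), hinv cur 1 (by omega)]
      by_cases hgap : pvFld (pvRow c₀ cur) 2 - endB ≤ 120
      · simp only [if_pos hgap, List.foldl_cons]
        exact ih cur _ c₀ _ (fun b j hj => by
          rw [pvFld_fillRange c (prev + 1) (cur + 1) b j hj]; exact hinv b j hj)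
      · simp only [if_neg hgap]
        exact ih cur _ c₀ c hinv

-- ===== VERDICT (by name: the statement is the Claim_ definition above) =====
theorem fill_sleep_block_gaps_spec : Claim_equal_fill_sleep_block_gaps := by
  intro idxes counter _dom _pre
  unfold Spec_fill_sleep_block_gaps
  match idxes with
  | [] => rfl
  | [x] => rfl
  | p0 :: cur :: tl =>
      unfold fill_sleep_block_gaps fill_sleep_block_gaps_alt count_sleep_block_gap
      rw [if_pos (by simp : 1 < (p0 :: cur :: tl).length)]
      have h0 : PySem.List.pyGet? (p0 :: cur :: tl) 0 = some p0 :=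
        PySem.List.pyGet?_zero_cons p0 (cur :: tl)
      rw [h0]
      simp only [Option.getD_some, List.drop_succ_cons, List.drop_zero]
      rw [pvA_fold (p0 :: cur :: tl) counter (cur :: tl) 1 p0 _ counter (by omega)
        (by simp [h0]) rfl]
      rw [pvB_fold (cur :: tl) p0 _ counter counter (fun b j _ => rfl)]
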